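-- pv_equiv track=rewrite | github.com/hackingmath/puzzles | numoku_solver4.py | calc_quadrant
-- ===== SOURCE A (Python) =====
-- def calc_quadrant(n):
--     '''Calculates which quadrant the given cell is in'''
--     quads = [[0,1,2,6,7,8,12,13,14],
--              [3,4,5,9,10,11,15,16,17],
--              [18,19,20,24,25,26,30,31,32],
--              [21,22,23,27,28,29,33,34,35]]
--     for q in range(4):
--         if n in quads[q]:
--             return q
-- ===== SOURCE B (Python) =====
-- def calc_quadrant(n):
--     '''Calculates which quadrant the given cell is in (closed form)'''
--     if 0 <= n <= 35:
--         row, col = divmod(n, 6)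
--         return (row // 3) * 2 + (col // 3)
--     return None
-- ===== Notes on version B (the rewrite author's own statement) =====
-- stated objective: simpler
-- what changed: Replaces the scan over four hard-coded index lists with a closed-form row/column arithmetic formula guarded by a range check.
import Mathlib
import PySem

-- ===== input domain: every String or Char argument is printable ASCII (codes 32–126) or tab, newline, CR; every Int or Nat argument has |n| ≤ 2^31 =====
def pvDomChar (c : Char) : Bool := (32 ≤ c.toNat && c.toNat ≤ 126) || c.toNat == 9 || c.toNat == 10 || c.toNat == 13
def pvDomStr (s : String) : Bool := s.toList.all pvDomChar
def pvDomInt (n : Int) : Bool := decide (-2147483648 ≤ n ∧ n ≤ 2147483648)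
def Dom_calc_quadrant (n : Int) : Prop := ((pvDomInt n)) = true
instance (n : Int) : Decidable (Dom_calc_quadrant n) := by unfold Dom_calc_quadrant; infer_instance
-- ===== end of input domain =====

set_option maxRecDepth 4096


-- B replaces A's scan over four hard-coded index lists with a closed-form arithmetic formula (simpler).

-- ===== PORT A =====
-- the four quadrant index lists of A
def pvQuadsA : List (List Int) :=
  [[0,1,2,6,7,8,12,13,14],
   [3,4,5,9,10,11,15,16,17],
   [18,19,20,24,25,26,30,31,32],
   [21,22,23,27,28,29,33,34,35]]

-- the 'for q in range(4): if n in quads[q]: return q' loop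
def pvLoopA (n : Int) : List Int → Option Int
  | [] => none
  | q :: rest =>
    match PySem.List.pyGet? pvQuadsA q with
    | some row => if row.contains n then some q else pvLoopA n rest
    | none => none

def calc_quadrant (n : Int) : Option Int :=
  pvLoopA n (PySem.List.pyRange 0 4 1)

-- ===== PORT B =====
def calc_quadrant_alt (n : Int) : Option Int :=
  if 0 ≤ n ∧ n ≤ 35 then
    let row := PySem.Int.floordiv n 6
    let col := PySem.Int.mod n 6
    some ((PySem.Int.floordiv row 3) * 2 + PySem.Int.floordiv col 3)
  else
    none

-- ===== PRECONDITION & SPEC =====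
def Spec_calc_quadrant (n : Int) (out : Option Int) : Prop := out = calc_quadrant_alt n
instance (n : Int) (out : Option Int) : Decidable (Spec_calc_quadrant n out) := by unfold Spec_calc_quadrant; infer_instance

-- ===== CLAIM (what is proved, stated in full; the proofs are below) =====
def Claim_equal_calc_quadrant : Prop := ∀ (n : Int), Dom_calc_quadrant n → Spec_calc_quadrant n (calc_quadrant n)

-- ===== LEMMAS AND PROOFS =====

theorem calc_quadrant_eq (n : Int) : calc_quadrant n = calc_quadrant_alt n := by
  by_cases h : 0 ≤ n ∧ n ≤ 35
  · obtain ⟨h0, h1⟩ := h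
    interval_cases n <;> decide
  · have hout : calc_quadrant_alt n = none := by
      simp [calc_quadrant_alt, h]
    rw [hout]
    have h' : n < 0 ∨ 35 < n := by omega
    have hr : PySem.List.pyRange 0 4 1 = [0, 1, 2, 3] := by decide
    have g0 : PySem.List.pyGet? pvQuadsA 0 = some [0,1,2,6,7,8,12,13,14] := by decide
    have g1 : PySem.List.pyGet? pvQuadsA 1 = some [3,4,5,9,10,11,15,16,17] := by decide
    have g2 : PySem.List.pyGet? pvQuadsA 2 = some [18,19,20,24,25,26,30,31,32] := by decide
    have g3 : PySem.List.pyGet? pvQuadsA 3 = some [21,22,23,27,28,29,33,34,35] := by decide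
    simp only [calc_quadrant, hr, pvLoopA, g0, g1, g2, g3,
      List.contains_eq_mem, List.mem_cons, List.not_mem_nil, or_false,
      decide_eq_true_eq]
    split_ifs <;> first | rfl | omega

-- ===== VERDICT (by name: the statement is the Claim_ definition above) =====
theorem calc_quadrant_spec : Claim_equal_calc_quadrant := by
  intro n _
  unfold Spec_calc_quadrant
  exact calc_quadrant_eq n
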